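-- pv_equiv track=rewrite | github.com/JanKaczmarski/agh-wdi | zestaw-4/zadanie4-10.py | zadanie_10
-- ===== SOURCE A (Python) =====
-- def zadanie_10(T):
--     N = len(T)
--     sol = [0 for _ in range(N + N)]
--     for i in range(N):
--         for j in range(N):
--             if T[i][j] == 0:
--                 sol[i], sol[N + j] = 1, 1
--             # end
--         # end
--     # end
--
--     for i in range(len(sol)):
--         if sol[i] == 0:
--             return False
--         # end
--     # end
--     return True
-- ===== SOURCE B (Python) =====
-- def zadanie_10(T):
--     N = len(T)
--     row_ok = all(any(T[i][j] == 0 for j in range(N)) for i in range(N))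
--     col_ok = all(any(T[i][j] == 0 for i in range(N)) for j in range(N))
--     return row_ok and col_ok
-- ===== Notes on version B (the rewrite author's own statement) =====
-- stated objective: simpler
-- what changed: Replaces A's 2N flag array filled by a full marking pass plus a final scan with two direct short-circuiting passes: all rows contain a zero, then all columns contain a zero.
import Mathlib
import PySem

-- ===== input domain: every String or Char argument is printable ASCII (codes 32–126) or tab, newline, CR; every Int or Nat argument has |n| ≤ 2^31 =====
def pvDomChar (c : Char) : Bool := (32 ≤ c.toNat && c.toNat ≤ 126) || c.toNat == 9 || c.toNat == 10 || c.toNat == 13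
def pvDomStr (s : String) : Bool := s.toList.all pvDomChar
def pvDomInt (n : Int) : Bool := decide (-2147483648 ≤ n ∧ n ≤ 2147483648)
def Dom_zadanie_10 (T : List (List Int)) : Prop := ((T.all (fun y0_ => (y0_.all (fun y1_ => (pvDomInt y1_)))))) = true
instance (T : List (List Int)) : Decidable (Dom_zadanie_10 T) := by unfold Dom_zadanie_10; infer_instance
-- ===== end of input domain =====

-- B replaces A's 2N flag array (one marking pass + final scan) with two direct
-- short-circuiting passes: every row contains a zero, then every column does.


-- ===== PORT A =====
-- the final loop of A: scan sol, return False at the first zero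
def checkA : List Int → Bool
  | [] => true
  | x :: xs => if x = 0 then false else checkA xs

def zadanie_10 (T : List (List Int)) : Bool :=
  let N := T.length
  let sol0 : List Int := (List.range (N + N)).map (fun _ => (0 : Int))
  let sol := (List.range N).foldl (fun sol i =>
      (List.range N).foldl (fun sol j =>
        if (T.getD i []).getD j 0 = 0 then (sol.set i 1).set (N + j) 1 else sol) sol) sol0
  checkA sol

-- ===== PORT B =====
def zadanie_10_alt (T : List (List Int)) : Bool :=
  let N := T.length
  let rowOk := (List.range N).all (fun i => (List.range N).any (fun j => (T.getD i []).getD j 0 == 0))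
  let colOk := (List.range N).all (fun j => (List.range N).any (fun i => (T.getD i []).getD j 0 == 0))
  rowOk && colOk

-- ===== PRECONDITION & SPEC =====
-- Pre_ excludes exactly the ragged inputs (some row shorter than len(T)) on which
-- the Python A raises IndexError at T[i][j].
def Pre_zadanie_10 (T : List (List Int)) : Prop :=
  ∀ row ∈ T, T.length ≤ row.length
instance (T : List (List Int)) : Decidable (Pre_zadanie_10 T) := by unfold Pre_zadanie_10; infer_instance

def pvWitness_zadanie_10 : List (List Int) := [[0, 1], [1, 0]]

def Spec_zadanie_10 (T : List (List Int)) (out : Bool) : Prop := out = zadanie_10_alt T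
instance (T : List (List Int)) (out : Bool) : Decidable (Spec_zadanie_10 T out) := by unfold Spec_zadanie_10; infer_instance

-- ===== CLAIM (what is proved, stated in full; the proofs are below) =====
def Claim_equal_zadanie_10 : Prop := ∀ (T : List (List Int)), Dom_zadanie_10 T → Pre_zadanie_10 T → Spec_zadanie_10 T (zadanie_10 T)

-- ===== LEMMAS AND PROOFS =====

-- the matrix entry both ports read
def entry (T : List (List Int)) (i j : Nat) : Int := (T.getD i []).getD j 0

-- the per-pair update step of A's marking pass
def stepA (T : List (List Int)) (N : Nat) (sol : List Int) (p : Nat × Nat) : List Int :=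
  if entry T p.1 p.2 = 0 then (sol.set p.1 1).set (N + p.2) 1 else sol

theorem getD_set (l : List Int) (i : Nat) (a : Int) (k : Nat) :
    (l.set i a).getD k 0 = if i = k ∧ k < l.length then a else l.getD k 0 := by
  simp only [List.getD, List.getElem?_set]
  split_ifs <;> simp_all

theorem stepA_length (T : List (List Int)) (N : Nat) (sol : List Int) (p : Nat × Nat) :
    (stepA T N sol p).length = sol.length := by
  unfold stepA; split_ifs <;> simp

theorem stepA_getD (T : List (List Int)) (N : Nat) (sol : List Int) (p : Nat × Nat) (k : Nat) :
    (stepA T N sol p).getD k 0 =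
      if entry T p.1 p.2 = 0 ∧ (k = p.1 ∨ k = N + p.2) ∧ k < sol.length then 1
      else sol.getD k 0 := by
  unfold stepA
  by_cases h : entry T p.1 p.2 = 0
  · rw [if_pos h, getD_set, getD_set]
    simp only [List.length_set, h, true_and]
    split_ifs <;> first | rfl | omega
  · rw [if_neg h]
    simp [h]

theorem foldl_stepA_getD (T : List (List Int)) (N : Nat) (L : List (Nat × Nat))
    (sol : List Int) (k : Nat) :
    (L.foldl (stepA T N) sol).getD k 0 =
      if ∃ p ∈ L, entry T p.1 p.2 = 0 ∧ (k = p.1 ∨ k = N + p.2) ∧ k < sol.length then 1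
      else sol.getD k 0 := by
  induction L generalizing sol with
  | nil => simp
  | cons q L ih =>
    rw [List.foldl_cons, ih, stepA_getD]
    simp only [stepA_length, List.exists_mem_cons_iff]
    split_ifs with h1 h2 h3 h4 h5
    · rfl
    · exact absurd (Or.inr h1) h2
    · rfl
    · exact absurd (Or.inl h3) h4
    · rcases h5 with h | h
      · exact absurd h h3
      · exact absurd h h1
    · rfl

theorem foldl_stepA_length (T : List (List Int)) (N : Nat) (L : List (Nat × Nat)) (sol : List Int) :
    (L.foldl (stepA T N) sol).length = sol.length := by
  induction L generalizing sol with
  | nil => rfl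
  | cons p L ih => simp [List.foldl_cons, ih, stepA_length]

theorem checkA_iff (l : List Int) : checkA l = true ↔ ∀ k < l.length, l.getD k 0 ≠ 0 := by
  induction l with
  | nil => simp [checkA]
  | cons x xs ih =>
    simp only [checkA]
    split_ifs with hx
    · simp only [false_iff, not_forall]
      exact ⟨0, by simp, by simpa [List.getD] using hx⟩
    · rw [ih]
      constructor
      · intro h k hk
        cases k with
        | zero => simpa [List.getD] using hx
        | succ k => simpa [List.getD] using h k (by simpa using hk)
      · intro h k hk
        simpa [List.getD] using h (k + 1) (by simpa using hk)

-- the list of index pairs A's nested loops visit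
def pairsL (N : Nat) : List (Nat × Nat) :=
  (List.range N).flatMap (fun i => (List.range N).map (fun j => (i, j)))

theorem mem_pairsL (N : Nat) (p : Nat × Nat) : p ∈ pairsL N ↔ p.1 < N ∧ p.2 < N := by
  cases p with
  | mk i j =>
    simp only [pairsL, List.mem_flatMap, List.mem_map, List.mem_range, Prod.mk.injEq]
    constructor
    · rintro ⟨a, ha, b, hb, rfl, rfl⟩; exact ⟨ha, hb⟩
    · rintro ⟨hi, hj⟩; exact ⟨i, hi, j, hj, rfl, rfl⟩

theorem nested_eq_pairs (T : List (List Int)) (N : Nat) (sol : List Int) :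
    (List.range N).foldl (fun sol i =>
      (List.range N).foldl (fun sol j =>
        if (T.getD i []).getD j 0 = 0 then (sol.set i 1).set (N + j) 1 else sol) sol) sol
      = (pairsL N).foldl (stepA T N) sol := by
  have hfn : (fun (sol : List Int) i => (List.range N).foldl (fun sol j =>
        if (T.getD i []).getD j 0 = 0 then (sol.set i 1).set (N + j) 1 else sol) sol)
      = (fun (acc : List Int) a => ((List.range N).map (fun j => (a, j))).foldl (stepA T N) acc) := by
    funext sol i
    rw [List.foldl_map]
    rfl
  rw [pairsL, List.foldl_flatMap, hfn]

theorem sol0_getD (m k : Nat) : ((List.range m).map (fun _ => (0 : Int))).getD k 0 = 0 := by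
  simp only [List.getD, List.getElem?_map]
  rcases h : (List.range m)[k]? with _ | v <;> simp

-- characterisation of port A
theorem zadanie_10_iff (T : List (List Int)) :
    zadanie_10 T = true ↔
      ∀ k < T.length + T.length, ∃ i j, i < T.length ∧ j < T.length ∧ entry T i j = 0 ∧
        (k = i ∨ k = T.length + j) := by
  unfold zadanie_10
  simp only []
  rw [nested_eq_pairs, checkA_iff]
  have hlen : ((pairsL T.length).foldl (stepA T T.length)
      ((List.range (T.length + T.length)).map (fun _ => (0 : Int)))).length
      = T.length + T.length := by
    rw [foldl_stepA_length]; simp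
  rw [hlen]
  constructor
  · intro h k hk
    have := h k hk
    rw [foldl_stepA_getD] at this
    split_ifs at this with hc
    · obtain ⟨p, hp, he, hor, _⟩ := hc
      rw [mem_pairsL] at hp
      exact ⟨p.1, p.2, hp.1, hp.2, he, hor⟩
    · exact absurd (sol0_getD _ _) this
  · intro h k hk
    rw [foldl_stepA_getD]
    obtain ⟨i, j, hi, hj, he, hor⟩ := h k hk
    rw [if_pos ⟨(i, j), (mem_pairsL _ _).2 ⟨hi, hj⟩, he, hor, by simpa using hk⟩]
    decide

-- characterisation of port B
theorem zadanie_10_alt_iff (T : List (List Int)) :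
    zadanie_10_alt T = true ↔
      (∀ i < T.length, ∃ j < T.length, entry T i j = 0) ∧
      (∀ j < T.length, ∃ i < T.length, entry T i j = 0) := by
  unfold zadanie_10_alt entry
  simp [List.all_eq_true, List.any_eq_true, List.mem_range]

-- ===== VERDICT (by name: the statement is the Claim_ definition above) =====
theorem zadanie_10_spec : Claim_equal_zadanie_10 := by
  intro T _ _
  unfold Spec_zadanie_10
  rw [Bool.eq_iff_iff, zadanie_10_iff, zadanie_10_alt_iff]
  constructor
  · intro h
    refine ⟨fun i hi => ?_, fun j hj => ?_⟩
    · obtain ⟨a, b, ha, hb, he, hor⟩ := h i (by omega)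
      rcases hor with rfl | h' 
      · exact ⟨b, hb, he⟩
      · omega
    · obtain ⟨a, b, ha, hb, he, hor⟩ := h (T.length + j) (by omega)
      rcases hor with h' | h'
      · omega
      · have : b = j := by omega
        exact ⟨a, ha, this ▸ he⟩
  · rintro ⟨hr, hc⟩ k hk
    by_cases hkN : k < T.length
    · obtain ⟨j, hj, he⟩ := hr k hkN
      exact ⟨k, j, hkN, hj, he, Or.inl rfl⟩
    · obtain ⟨i, hi, he⟩ := hc (k - T.length) (by omega)
      exact ⟨i, k - T.length, hi, by omega, he, Or.inr (by omega)⟩
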